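-- pv_equiv track=rewrite | github.com/1000zoo/python-programmers | level2/predict_crash.py | getRoutePoints
-- ===== SOURCE A (Python) =====
-- def getRoutePoints(p1, p2):
--     r1, c1 = p1
--     r2, c2 = p2
--     route_points = []
--
--     direct_r = 1 if r1 < r2 else -1
--
--     for r in range(r1, r2 + direct_r, direct_r):
--         route_points.append((r, c1))
--
--     direct_c = 1 if c1 < c2 else -1
--     for c in range(c1 + direct_c, c2 + direct_c, direct_c):
--         route_points.append((r2, c))
--     route_points.pop()
--     return route_points
-- ===== SOURCE B (Python) =====
-- def getRoutePoints(p1, p2):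
--     r, c = p1
--     r2, c2 = p2
--     points = []
--     for _ in range(abs(r2 - r) + abs(c2 - c)):
--         points.append((r, c))
--         if r != r2:
--             r += 1 if r < r2 else -1
--         else:
--             c += 1 if c < c2 else -1
--     return points
-- ===== Notes on version B (the rewrite author's own statement) =====
-- stated objective: simpler
-- what changed: Replaced the two directional range loops plus a trailing pop with a single walker loop that runs exactly |dr|+|dc| steps, appending the current position and stepping one unit toward the target (row first), so the destination is excluded naturally.
import Mathlib
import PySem

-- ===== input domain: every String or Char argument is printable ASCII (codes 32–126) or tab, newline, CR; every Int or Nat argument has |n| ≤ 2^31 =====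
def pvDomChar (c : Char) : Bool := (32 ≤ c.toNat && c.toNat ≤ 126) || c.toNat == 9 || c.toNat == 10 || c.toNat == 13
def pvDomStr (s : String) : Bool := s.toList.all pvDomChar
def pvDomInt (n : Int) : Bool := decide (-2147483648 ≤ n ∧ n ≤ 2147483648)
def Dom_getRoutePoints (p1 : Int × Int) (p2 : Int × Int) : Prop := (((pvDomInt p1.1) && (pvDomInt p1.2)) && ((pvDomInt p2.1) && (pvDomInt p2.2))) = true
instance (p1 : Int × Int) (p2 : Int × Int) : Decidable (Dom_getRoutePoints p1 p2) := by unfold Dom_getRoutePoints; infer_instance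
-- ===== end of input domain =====

-- B replaces the two directional range loops plus a trailing pop by a single walker
-- that runs exactly |Δr|+|Δc| steps toward the target (objective: simpler).


-- ===== PORT A =====
-- literal transliteration of A: two directed range loops appending points, then pop()
-- (the list is provably nonempty, so Python's pop() never raises; the `none` arm is unreachable)
def getRoutePoints (p1 : Int × Int) (p2 : Int × Int) : List (Int × Int) :=
  let r1 := p1.1
  let c1 := p1.2
  let r2 := p2.1
  let c2 := p2.2
  let directR : Int := if r1 < r2 then 1 else -1
  let directC : Int := if c1 < c2 then 1 else -1
  let routePoints : List (Int × Int) :=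
    (PySem.List.pyRange r1 (r2 + directR) directR).map (fun r => (r, c1)) ++
    (PySem.List.pyRange (c1 + directC) (c2 + directC) directC).map (fun c => (r2, c))
  match PySem.List.pop? routePoints with
  | some (_, rest) => rest
  | none => []

-- ===== PORT B =====
-- B's walker loop: `for _ in range(|Δr|+|Δc|)` becomes structural recursion on that fuel
def pvWalk (r2 c2 : Int) : Nat → Int → Int → List (Int × Int)
  | 0, _, _ => []
  | n + 1, r, c =>
    (r, c) ::
      (if r ≠ r2 then pvWalk r2 c2 n (r + (if r < r2 then 1 else -1)) c
       else pvWalk r2 c2 n r (c + (if c < c2 then 1 else -1)))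

def getRoutePoints_alt (p1 : Int × Int) (p2 : Int × Int) : List (Int × Int) :=
  pvWalk p2.1 p2.2 ((p2.1 - p1.1).natAbs + (p2.2 - p1.2).natAbs) p1.1 p1.2

-- ===== PRECONDITION & SPEC =====
def Spec_getRoutePoints (p1 : Int × Int) (p2 : Int × Int) (out : List (Int × Int)) : Prop := out = getRoutePoints_alt p1 p2
instance (p1 : Int × Int) (p2 : Int × Int) (out : List (Int × Int)) : Decidable (Spec_getRoutePoints p1 p2 out) := by unfold Spec_getRoutePoints; infer_instance

-- ===== CLAIM (what is proved, stated in full; the proofs are below) =====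
def Claim_equal_getRoutePoints : Prop := ∀ (p1 : Int × Int) (p2 : Int × Int), Dom_getRoutePoints p1 p2 → Spec_getRoutePoints p1 p2 (getRoutePoints p1 p2)

-- ===== LEMMAS AND PROOFS =====

-- A's list before the pop()
def pvPts (p1 p2 : Int × Int) : List (Int × Int) :=
  let r1 := p1.1
  let c1 := p1.2
  let r2 := p2.1
  let c2 := p2.2
  let directR : Int := if r1 < r2 then 1 else -1
  let directC : Int := if c1 < c2 then 1 else -1
  (PySem.List.pyRange r1 (r2 + directR) directR).map (fun r => (r, c1)) ++
  (PySem.List.pyRange (c1 + directC) (c2 + directC) directC).map (fun c => (r2, c))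

theorem pvPts_ne_nil (p1 p2 : Int × Int) : pvPts p1 p2 ≠ [] := by
  unfold pvPts
  by_cases h : p1.1 < p2.1
  · simp [h, PySem.List.pyRange_one_cons (show p1.1 < p2.1 + 1 by omega)]
  · simp [h, PySem.List.pyRange_neg_one_cons (show p2.1 + -1 < p1.1 by omega)]

theorem pyNegSingleton (a : Int) : PySem.List.pyRange a (a + -1) (-1) = [a] := by
  rw [PySem.List.pyRange_neg_one_cons (show a + -1 < a by omega),
      PySem.List.pyRange_neg_one_eq_nil (show a - 1 ≤ a + -1 by omega)]

theorem getRoutePoints_eq (p1 p2 : Int × Int) :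
    getRoutePoints p1 p2 = (pvPts p1 p2).dropLast := by
  have h := pvPts_ne_nil p1 p2
  obtain ⟨xs, x, hx⟩ : ∃ xs x, pvPts p1 p2 = xs ++ [x] :=
    ⟨(pvPts p1 p2).dropLast, (pvPts p1 p2).getLast h, (List.dropLast_append_getLast h).symm⟩
  rw [show getRoutePoints p1 p2 = (match PySem.List.pop? (pvPts p1 p2) with
        | some (_, rest) => rest
        | none => []) from rfl, hx, PySem.List.pop?_last, List.dropLast_concat]

theorem pvPts_self (r c : Int) : pvPts (r, c) (r, c) = [(r, c)] := by
  unfold pvPts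
  simp [pyNegSingleton, PySem.List.pyRange_neg_one_eq_nil (show c + -1 ≤ c + -1 by omega)]

theorem pvPts_cons_r (r c r2 c2 : Int) (h : r ≠ r2) :
    pvPts (r, c) (r2, c2) = (r, c) :: pvPts (r + (if r < r2 then 1 else -1), c) (r2, c2) := by
  unfold pvPts
  rcases lt_or_gt_of_ne h with hlt | hgt
  · by_cases h2 : r + 1 < r2
    · simp [hlt, h2, PySem.List.pyRange_one_cons (show r < r2 + 1 by omega)]
    · have he : r2 = r + 1 := by omega
      subst he
      simp [hlt, h2, sub_eq_add_neg, pyNegSingleton,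
            PySem.List.pyRange_one_cons (show r < r + 1 + 1 by omega),
            PySem.List.pyRange_one_cons (show r + 1 < r + 1 + 1 by omega),
            PySem.List.pyRange_one_eq_nil (show r + 1 + 1 ≤ r + 1 + 1 by omega),
            PySem.List.pyRange_neg_one_cons (show r < r + 1 by omega),
            PySem.List.pyRange_neg_one_eq_nil (show r ≤ r by omega)]
  · have h1 : ¬ r < r2 := by omega
    have h2 : ¬ r + -1 < r2 := by omega
    simp [h1, h2, sub_eq_add_neg, PySem.List.pyRange_neg_one_cons (show r2 + -1 < r by omega)]

theorem pvPts_cons_c (r2 c c2 : Int) (h : c ≠ c2) :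
    pvPts (r2, c) (r2, c2) = (r2, c) :: pvPts (r2, c + (if c < c2 then 1 else -1)) (r2, c2) := by
  unfold pvPts
  rcases lt_or_gt_of_ne h with hlt | hgt
  · by_cases h2 : c + 1 < c2
    · simp [hlt, h2, pyNegSingleton, PySem.List.pyRange_one_cons (show c + 1 < c2 + 1 by omega)]
    · have he : c2 = c + 1 := by omega
      subst he
      simp [hlt, h2, sub_eq_add_neg, pyNegSingleton,
            PySem.List.pyRange_one_cons (show c + 1 < c + 1 + 1 by omega),
            PySem.List.pyRange_one_eq_nil (show c + 1 + 1 ≤ c + 1 + 1 by omega),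
            PySem.List.pyRange_neg_one_eq_nil (show c ≤ c by omega),
            PySem.List.pyRange_neg_one_cons (show c < c + 1 by omega)]
  · have h1 : ¬ c < c2 := by omega
    have h2 : ¬ c + -1 < c2 := by omega
    simp [h1, h2, sub_eq_add_neg, pyNegSingleton,
          PySem.List.pyRange_neg_one_cons (show c2 + -1 < c by omega),
          PySem.List.pyRange_neg_one_cons (show c2 + -1 < c + -1 by omega)]

theorem pvMain (n : Nat) : ∀ (r c r2 c2 : Int), (r2 - r).natAbs + (c2 - c).natAbs = n →
    (pvPts (r, c) (r2, c2)).dropLast = pvWalk r2 c2 n r c := by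
  induction n with
  | zero =>
    intro r c r2 c2 h
    have hr : r2 = r := by omega
    have hc : c2 = c := by omega
    subst hr; subst hc
    simp [pvPts_self, pvWalk]
  | succ n ih =>
    intro r c r2 c2 h
    by_cases hr : r = r2
    · subst hr
      have hc : c ≠ c2 := by omega
      rw [pvPts_cons_c r c c2 (by omega),
          List.dropLast_cons_of_ne_nil (pvPts_ne_nil _ _)]
      rw [pvWalk]
      simp only [ne_eq, not_true_eq_false, if_false]
      rw [ih r (c + (if c < c2 then 1 else -1)) r c2 (by split_ifs <;> omega)]
    · rw [pvPts_cons_r r c r2 c2 hr,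
          List.dropLast_cons_of_ne_nil (pvPts_ne_nil _ _)]
      rw [pvWalk]
      simp only [ne_eq, hr, not_false_eq_true, if_true]
      rw [ih (r + (if r < r2 then 1 else -1)) c r2 c2 (by split_ifs <;> omega)]

-- ===== VERDICT (by name: the statement is the Claim_ definition above) =====
theorem getRoutePoints_spec : Claim_equal_getRoutePoints := by
  intro p1 p2 _
  unfold Spec_getRoutePoints getRoutePoints_alt
  rw [getRoutePoints_eq]
  exact pvMain _ p1.1 p1.2 p2.1 p2.2 rfl
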